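-- pv_equiv track=rewrite | github.com/teyter/bioinfo | rosalind/problem03/solution3.py | findMultiMax
-- ===== SOURCE A (Python) =====
-- def findMultiMax(li):
--     # find max number
--     max = 0
--     for i in range(len(li)):
--         temp = int(li[i][0])
--         if temp > max:
--             max = temp
--     # list all patterns with max nr
--     ret = []
--     for i in range(len(li)):
--         temp = int(li[i][0])
--         if temp == max:
--             ret.append(li[i][1])
--     return ret
-- ===== SOURCE B (Python) =====
-- def findMultiMax(li):
--     mx = 0
--     best = []
--     for row in li:
--         temp = int(row[0])
--         if temp > mx:
--             mx = temp
--             best = [row]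
--         elif temp == mx:
--             best.append(row)
--     return [row[1] for row in best]
-- ===== Notes on version B (the rewrite author's own statement) =====
-- stated objective: faster
-- what changed: Replaces A's two sequential scans (one to find the max, one to collect matches) by a single state-carrying pass that keeps a running max and resets/extends the result list as the max changes.
import Mathlib
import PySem

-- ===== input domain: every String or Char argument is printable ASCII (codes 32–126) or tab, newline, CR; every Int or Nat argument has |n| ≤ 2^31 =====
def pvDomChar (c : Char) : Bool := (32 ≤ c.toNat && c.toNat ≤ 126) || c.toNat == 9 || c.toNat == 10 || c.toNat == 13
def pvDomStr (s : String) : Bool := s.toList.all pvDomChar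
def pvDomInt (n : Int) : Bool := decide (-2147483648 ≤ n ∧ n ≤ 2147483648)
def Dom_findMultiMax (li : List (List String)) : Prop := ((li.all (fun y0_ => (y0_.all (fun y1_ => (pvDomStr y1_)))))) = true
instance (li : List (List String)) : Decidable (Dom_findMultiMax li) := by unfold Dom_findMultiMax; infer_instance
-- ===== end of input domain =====

-- B folds A's two scans (find max, then collect) into ONE state-carrying pass over the rows
-- (running max, reset/extend the kept rows), then projects the second elements at the end.

-- shared helper: temp = int(row[0]) (defaults are unreachable under Pre_)
def pvTemp (row : List String) : Int :=
  (PySem.Int.ofStr? ((PySem.List.pyGet? row 0).getD "")).getD 0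

-- helper: row[1] (default unreachable under Pre_)
def pvSnd (row : List String) : String :=
  (PySem.List.pyGet? row 1).getD ""

-- ===== PORT A =====
def findMultiMax (li : List (List String)) : List String :=
  -- first loop: find max number, seeded at 0
  let max := li.foldl (fun mx row =>
    let temp := pvTemp row
    if temp > mx then temp else mx) 0
  -- second loop: list all patterns with max nr
  li.foldl (fun ret row =>
    let temp := pvTemp row
    if temp = max then ret ++ [pvSnd row] else ret) []

-- ===== PORT B =====
def findMultiMax_alt (li : List (List String)) : List String :=
  (li.foldl (fun (st : Int × List (List String)) row =>
      let temp := pvTemp row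
      if temp > st.1 then (temp, [row])
      else if temp = st.1 then (st.1, st.2 ++ [row])
      else st)
    ((0 : Int), ([] : List (List String)))).2.map (fun row => pvSnd row)

-- ===== PRECONDITION & SPEC =====
-- Exactly where A returns: every row's first entry exists and parses as a Python int
-- (else ValueError/IndexError in the first loop), and every row whose value attains
-- the 0-seeded maximum has a second entry (else IndexError in the second loop).
def Pre_findMultiMax (li : List (List String)) : Prop :=
  ∀ r ∈ li, ((PySem.Int.ofStr? ((PySem.List.pyGet? r 0).getD "")).isSome = true) ∧
    ((0 ≤ pvTemp r ∧ ∀ r' ∈ li, pvTemp r' ≤ pvTemp r) → 2 ≤ r.length)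
instance (li : List (List String)) : Decidable (Pre_findMultiMax li) := by
  unfold Pre_findMultiMax; infer_instance
def pvWitness_findMultiMax : List (List String) := [["3", "AAA"], ["-1"], ["3", "BBB"]]

def Spec_findMultiMax (li : List (List String)) (out : List String) : Prop := out = findMultiMax_alt li
instance (li : List (List String)) (out : List String) : Decidable (Spec_findMultiMax li out) := by unfold Spec_findMultiMax; infer_instance

-- ===== CLAIM (what is proved, stated in full; the proofs are below) =====
def Claim_equal_findMultiMax : Prop := ∀ (li : List (List String)), Dom_findMultiMax li → Pre_findMultiMax li → Spec_findMultiMax li (findMultiMax li)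

-- ===== LEMMAS AND PROOFS =====

-- A's first loop, starting from mx
def pvMaxFold (li : List (List String)) (mx : Int) : Int :=
  li.foldl (fun m row => let t := pvTemp row; if t > m then t else m) mx

-- the rows with value M, collected left to right (generic in the projection f)
def pvCollect {α : Type} (f : List String → α) (M : Int) (li : List (List String)) (acc : List α) : List α :=
  li.foldl (fun ret row => let t := pvTemp row; if t = M then ret ++ [f row] else ret) acc

lemma pvMaxFold_le (li : List (List String)) : ∀ mx : Int, mx ≤ pvMaxFold li mx := by
  induction li with
  | nil => intro mx; simp [pvMaxFold]
  | cons r rest ih =>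
      intro mx
      simp only [pvMaxFold, List.foldl_cons]
      by_cases h : pvTemp r > mx
      · simp only [h, if_pos]
        exact le_trans (le_of_lt h) (ih (pvTemp r))
      · simp only [h, if_false]
        exact ih mx

lemma pvCollect_acc {α : Type} (f : List String → α) (M : Int) (li : List (List String)) :
    ∀ acc, pvCollect f M li acc = acc ++ pvCollect f M li [] := by
  induction li with
  | nil => intro acc; simp [pvCollect]
  | cons r rest ih =>
      intro acc
      simp only [pvCollect, List.foldl_cons]
      split_ifs with h
      · have h2 := ih ([] ++ [f r])
        simp only [pvCollect] at h2
        exact (ih (acc ++ [f r])).trans (by rw [h2]; simp [pvCollect])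
      · exact ih acc

lemma pvCollect_cons {α : Type} (f : List String → α) (M : Int) (r : List String) (rest : List (List String)) :
    pvCollect f M (r :: rest) [] = (if pvTemp r = M then [f r] else []) ++ pvCollect f M rest [] := by
  simp only [pvCollect, List.foldl_cons]
  split_ifs with h
  · have h2 := pvCollect_acc f M rest ([] ++ [f r])
    simp only [pvCollect] at h2
    rw [h2]
    simp
  · simp

-- projecting the collected rows afterwards equals collecting the projections
lemma pvCollect_map (M : Int) (li : List (List String)) :
    (pvCollect id M li []).map (fun row => pvSnd row) = pvCollect pvSnd M li [] := by
  induction li with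
  | nil => simp [pvCollect]
  | cons r rest ih =>
      rw [pvCollect_cons, pvCollect_cons, List.map_append, ih]
      by_cases h : pvTemp r = M
      · rw [if_pos h, if_pos h]; rfl
      · rw [if_neg h, if_neg h]; rfl

-- the single-pass loop invariant: B's fold from (mx, best) keeps exactly the rows whose value
-- attains the updated max, prefixed by best exactly when the max did not change.
lemma pvLoopB (li : List (List String)) :
    ∀ (mx : Int) (best : List (List String)),
      (li.foldl (fun (st : Int × List (List String)) row =>
          let temp := pvTemp row
          if temp > st.1 then (temp, [row])
          else if temp = st.1 then (st.1, st.2 ++ [row])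
          else st) (mx, best)).2
        = (if pvMaxFold li mx = mx then best else []) ++ pvCollect id (pvMaxFold li mx) li [] := by
  induction li with
  | nil => intro mx best; simp [pvMaxFold, pvCollect]
  | cons r rest ih =>
      intro mx best
      simp only [List.foldl_cons]
      have hmax : pvMaxFold (r :: rest) mx
          = pvMaxFold rest (if pvTemp r > mx then pvTemp r else mx) := by
        simp [pvMaxFold, List.foldl_cons]
      by_cases h1 : pvTemp r > mx
      · -- new max: reset best
        have hM : pvMaxFold (r :: rest) mx = pvMaxFold rest (pvTemp r) := by
          rw [hmax]; simp [h1]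
        have hne : pvMaxFold rest (pvTemp r) ≠ mx := by
          have := pvMaxFold_le rest (pvTemp r)
          omega
        rw [if_pos h1, ih (pvTemp r) [r], hM, if_neg hne, pvCollect_cons]
        simp only [List.nil_append]
        by_cases h2 : pvMaxFold rest (pvTemp r) = pvTemp r
        · rw [if_pos h2, if_pos h2.symm]
          rfl
        · rw [if_neg h2, if_neg (fun h => h2 h.symm)]
      · rw [if_neg h1]
        have hM : pvMaxFold (r :: rest) mx = pvMaxFold rest mx := by
          rw [hmax]; simp [h1]
        by_cases h2 : pvTemp r = mx
        · -- equal: append the row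
          rw [if_pos h2, ih mx (best ++ [r]), hM, pvCollect_cons, h2]
          by_cases h3 : pvMaxFold rest mx = mx
          · rw [if_pos h3, if_pos h3, if_pos h3.symm]
            simp
          · rw [if_neg h3, if_neg h3, if_neg (fun h => h3 h.symm)]
            simp
        · -- strictly smaller: skip
          rw [if_neg h2, ih mx best, hM, pvCollect_cons]
          have hne : pvTemp r ≠ pvMaxFold rest mx := by
            have := pvMaxFold_le rest mx
            omega
          rw [if_neg hne]
          simp

-- ===== VERDICT (by name: the statement is the Claim_ definition above) =====
theorem findMultiMax_spec : Claim_equal_findMultiMax := by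
  intro li _ _
  unfold Spec_findMultiMax findMultiMax findMultiMax_alt
  rw [pvLoopB li 0 []]
  rw [show (li.foldl (fun mx row => let temp := pvTemp row; if temp > mx then temp else mx) 0)
        = pvMaxFold li 0 from rfl]
  rw [show (li.foldl (fun ret row => let temp := pvTemp row;
        if temp = pvMaxFold li 0 then ret ++ [pvSnd row] else ret) [] : List String)
        = pvCollect pvSnd (pvMaxFold li 0) li [] from rfl]
  rw [← pvCollect_map]
  by_cases h : pvMaxFold li 0 = 0 <;> simp [h]
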